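-- pv_equiv track=rewrite | github.com/pijel/sudoku_solver | valid_sudoku.py | check
-- ===== SOURCE A (Python) =====
-- def check(arr):
--     seen = set([])
--     arr = [x for x in arr if x != "."]
--     for k in arr:
--         if k in seen:
--             return False
--         seen.add(k)
--     return True
-- ===== SOURCE B (Python) =====
-- def check(arr):
--     rest = list(arr)
--     while rest:
--         x = rest.pop(0)
--         if x != "." and x in rest:
--             return False
--     return True
-- ===== Notes on version B (the rewrite author's own statement) =====
-- stated objective: alternative
-- what changed: Drops the seen-set and the filtering pass entirely: B consumes the list front-to-back, testing each non-dot element for membership in the remaining suffix, so no auxiliary set is built; it trades the hash set for a quadratic suffix scan.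
import Mathlib
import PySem

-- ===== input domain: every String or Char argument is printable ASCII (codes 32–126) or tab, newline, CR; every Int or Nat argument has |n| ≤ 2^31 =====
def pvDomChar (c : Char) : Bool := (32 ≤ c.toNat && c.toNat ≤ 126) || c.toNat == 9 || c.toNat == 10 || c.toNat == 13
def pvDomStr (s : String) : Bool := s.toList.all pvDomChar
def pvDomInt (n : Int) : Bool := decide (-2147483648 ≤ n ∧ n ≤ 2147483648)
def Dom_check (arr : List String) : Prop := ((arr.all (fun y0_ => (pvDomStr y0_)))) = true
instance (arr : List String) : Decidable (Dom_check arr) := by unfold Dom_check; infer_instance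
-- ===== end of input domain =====

-- B drops A's seen-set and filtering pass: it consumes the list front-to-back and
-- tests each non-dot element against the remaining suffix (quadratic, no set); objective: alternative.

-- ===== PORT A =====
def checkLoop (seen : PySem.Set String) : List String → Bool
  | [] => true
  | k :: rest =>
    if PySem.Set.contains seen k then false
    else checkLoop (PySem.Set.add seen k) rest

def check (arr : List String) : Bool :=
  checkLoop PySem.Set.empty (arr.filter (fun x => x != "."))

-- ===== PORT B =====
-- while rest: x = rest.pop(0); if x != "." and x in rest: return False
def check_alt : List String → Bool
  | [] => true
  | x :: rest => if x != "." && rest.contains x then false else check_alt rest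

-- ===== PRECONDITION & SPEC =====
def Spec_check (arr : List String) (out : Bool) : Prop := out = check_alt arr
instance (arr : List String) (out : Bool) : Decidable (Spec_check arr out) := by unfold Spec_check; infer_instance

-- ===== CLAIM (what is proved, stated in full; the proofs are below) =====
def Claim_equal_check : Prop := ∀ (arr : List String), Dom_check arr → Spec_check arr (check arr)

-- ===== LEMMAS AND PROOFS =====
lemma checkLoop_true_iff (l : List String) (s : PySem.Set String) :
    checkLoop s l = true ↔ (∀ x ∈ l, x ∉ s) ∧ l.Nodup := by
  induction l generalizing s with
  | nil => simp [checkLoop]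
  | cons k rest ih =>
    rw [List.nodup_cons]
    by_cases hm : k ∈ s
    · have hc : PySem.Set.contains s k = true := by simpa [PySem.Set.contains] using hm
      simp only [checkLoop, hc, if_true]
      constructor
      · intro h; exact absurd h (by simp)
      · rintro ⟨h, _⟩; exact absurd hm (h k (by simp))
    · have hc : PySem.Set.contains s k = false := by
        simpa [PySem.Set.contains] using hm
      have hadd : ∀ x, x ∈ PySem.Set.add s k ↔ x ∈ s ∨ x = k := by
        intro x; simp [PySem.Set.add, hm, List.mem_append, or_comm]
      simp only [checkLoop, hc, Bool.false_eq_true, if_false, ih]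
      constructor
      · rintro ⟨h, hnd⟩
        refine ⟨?_, ?_, hnd⟩
        · intro x hx
          rcases List.mem_cons.mp hx with rfl | hx
          · exact hm
          · intro hxs; exact (h x hx) ((hadd x).mpr (Or.inl hxs))
        · intro hk
          exact (h k hk) ((hadd k).mpr (Or.inr rfl))
      · rintro ⟨h, hknr, hnd⟩
        refine ⟨?_, hnd⟩
        intro x hx hxadd
        rcases (hadd x).mp hxadd with hxs | rfl
        · exact h x (List.mem_cons_of_mem _ hx) hxs
        · exact hknr hx

lemma check_true_iff (arr : List String) :
    check arr = true ↔ (arr.filter (fun x => x != ".")).Nodup := by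
  unfold check
  rw [checkLoop_true_iff]
  simp [PySem.Set.empty]

lemma check_alt_true_iff (arr : List String) :
    check_alt arr = true ↔ (arr.filter (fun x => x != ".")).Nodup := by
  induction arr with
  | nil => simp [check_alt]
  | cons x rest ih =>
    by_cases hx : x = "."
    · subst hx
      simp only [check_alt, bne_self_eq_false, Bool.false_and, Bool.false_eq_true,
        if_false, ih]
      simp
    · have hbne : (x != ".") = true := by simp [hx]
      have hfc : (x :: rest).filter (fun y => y != ".") =
          x :: rest.filter (fun y => y != ".") := by
        simp [hbne]
      rw [hfc, List.nodup_cons]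
      by_cases hmem : x ∈ rest
      · have hcond : (x != "." && rest.contains x) = true := by
          simp [hbne, hmem]
        have hf : x ∈ rest.filter (fun y => y != ".") :=
          List.mem_filter.mpr ⟨hmem, hbne⟩
        simp only [check_alt, hcond, if_true]
        simp [hf]
      · have hcond : (x != "." && rest.contains x) = false := by
          simp [hmem]
        have hf : x ∉ rest.filter (fun y => y != ".") := fun h =>
          hmem (List.mem_filter.mp h).1
        simp only [check_alt, hcond, Bool.false_eq_true, if_false, ih]
        simp [hf]

-- ===== VERDICT (by name: the statement is the Claim_ definition above) =====
theorem check_spec : Claim_equal_check := by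
  intro arr _
  unfold Spec_check
  rw [Bool.eq_iff_iff, check_true_iff, check_alt_true_iff]
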